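-- pv_equiv track=rewrite | github.com/sgraaf/-Advent-of-Code-2024 | day09/solution.py | get_free_space_blocks
-- ===== SOURCE A (Python) =====
-- from collections.abc import Iterator
--
-- def get_free_space_blocks(
--     disk: dict[int, int], start: int, stop: int
-- ) -> Iterator[tuple[int, int]]:
--     """Yield all free space blocks between the start and stop positions."""
--     block_start = None
--     block_end = None
--     for position in range(start, stop + 1):
--         if position not in disk:
--             if block_start is None:
--                 block_start = position
--             block_end = position
--         elif not (block_start is None or block_end is None):
--             yield block_start, block_end
--             block_start = None
--             block_end = None
-- ===== SOURCE B (Python) =====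
-- def get_free_space_blocks(disk, start, stop):
--     """Yield all free space blocks between the start and stop positions."""
--     prev = start - 1
--     for p in sorted(k for k in disk if start <= k <= stop):
--         if p > prev + 1:
--             yield (prev + 1, p - 1)
--         prev = p
-- ===== Notes on version B (the rewrite author's own statement) =====
-- stated objective: alternative
-- what changed: Instead of scanning every position in [start, stop] and maintaining mutable run state, B sorts the occupied keys that fall in the range and emits the gap before each occupied key (the trailing run has no following occupied key, so it is skipped exactly as in A).
import Mathlib
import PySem

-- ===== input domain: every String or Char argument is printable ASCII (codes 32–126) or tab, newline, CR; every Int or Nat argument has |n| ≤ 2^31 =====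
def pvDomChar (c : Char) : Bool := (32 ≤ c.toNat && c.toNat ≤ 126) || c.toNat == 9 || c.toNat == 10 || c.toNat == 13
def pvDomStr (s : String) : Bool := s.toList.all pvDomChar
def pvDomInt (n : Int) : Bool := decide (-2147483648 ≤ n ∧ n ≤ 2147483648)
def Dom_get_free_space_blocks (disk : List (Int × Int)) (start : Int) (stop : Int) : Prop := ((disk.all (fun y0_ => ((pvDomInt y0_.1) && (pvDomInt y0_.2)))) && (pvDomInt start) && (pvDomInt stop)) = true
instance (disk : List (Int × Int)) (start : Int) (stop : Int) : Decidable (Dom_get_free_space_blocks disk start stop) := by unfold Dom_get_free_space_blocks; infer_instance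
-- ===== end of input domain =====

-- B sorts the occupied keys inside [start, stop] and emits the gap before each key, instead of scanning every position; proved equal to A.


-- ===== PORT A =====
-- state = (block_start, block_end, yielded blocks)
def pvStepA (disk : List (Int × Int)) (st : Option Int × Option Int × List (Int × Int)) (position : Int) : Option Int × Option Int × List (Int × Int) :=
  if (disk.any (fun kv => kv.1 == position)) = false then
    ((if st.1.isNone then some position else st.1), some position, st.2.2)
  else if st.1.isSome && st.2.1.isSome then
    (none, none, st.2.2 ++ [(st.1.getD 0, st.2.1.getD 0)])
  else st

def get_free_space_blocks (disk : List (Int × Int)) (start : Int) (stop : Int) : List (Int × Int) :=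
  ((PySem.List.pyRange start (stop + 1) 1).foldl (pvStepA disk) (none, none, [])).2.2

-- ===== PORT B =====
-- state = (prev, yielded blocks)
def pvStepB (st : Int × List (Int × Int)) (p : Int) : Int × List (Int × Int) :=
  (p, if st.1 + 1 < p then st.2 ++ [(st.1 + 1, p - 1)] else st.2)

def get_free_space_blocks_alt (disk : List (Int × Int)) (start : Int) (stop : Int) : List (Int × Int) :=
  -- 'for k in disk' iterates the dict's (distinct, first-occurrence) keys: PySem.List.dedup of the key column
  (((PySem.List.sorted ((PySem.List.dedup (disk.map Prod.fst)).filter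
      (fun k => decide (start ≤ k) && decide (k ≤ stop))) (fun x => x) false).foldl
    pvStepB (start - 1, [])).2)

-- ===== PRECONDITION & SPEC =====
def Spec_get_free_space_blocks (disk : List (Int × Int)) (start : Int) (stop : Int) (out : List (Int × Int)) : Prop := out = get_free_space_blocks_alt disk start stop
instance (disk : List (Int × Int)) (start : Int) (stop : Int) (out : List (Int × Int)) : Decidable (Spec_get_free_space_blocks disk start stop out) := by unfold Spec_get_free_space_blocks; infer_instance

-- ===== CLAIM (what is proved, stated in full; the proofs are below) =====
def Claim_equal_get_free_space_blocks : Prop := ∀ (disk : List (Int × Int)) (start : Int) (stop : Int), Dom_get_free_space_blocks disk start stop → Spec_get_free_space_blocks disk start stop (get_free_space_blocks disk start stop)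

-- ===== LEMMAS AND PROOFS =====

-- pure-recursive rendering of A's scan: n positions left, current position p, current block_start
def pvSimA (disk : List (Int × Int)) : Nat → Int → Option Int → List (Int × Int)
  | 0, _, _ => []
  | n+1, p, bs =>
    if disk.any (fun kv => kv.1 == p) then
      match bs with
      | some s => (s, p - 1) :: pvSimA disk n (p + 1) none
      | none => pvSimA disk n (p + 1) none
    else pvSimA disk n (p + 1) (some (bs.getD p))

-- pure-recursive rendering of B's gap emission
def pvSimB : Int → List Int → List (Int × Int)
  | _, [] => []
  | prev, p :: rest => (if prev + 1 < p then [(prev + 1, p - 1)] else []) ++ pvSimB p rest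

theorem pvFoldA (disk : List (Int × Int)) (n : Nat) :
    ∀ (p : Int) (bs : Option Int) (acc : List (Int × Int)),
    ((PySem.List.pyRange p (p + n) 1).foldl (pvStepA disk) (bs, bs.map (fun _ => p - 1), acc)).2.2
      = acc ++ pvSimA disk n p bs := by
  induction n with
  | zero =>
    intro p bs acc
    rw [PySem.List.pyRange_one_eq_nil (by simp)]
    simp [pvSimA]
  | succ n ih =>
    intro p bs acc
    rw [PySem.List.pyRange_one_cons (by omega : p < p + (↑(n+1) : Int))]
    have hb : p + (↑(n+1) : Int) = (p + 1) + (n : Int) := by push_cast; ring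
    rw [hb]
    by_cases hS : disk.any (fun kv => kv.1 == p) = true
    · cases bs with
      | some s =>
        have hstep : pvStepA disk (some s, (some s).map (fun _ => p - 1), acc) p
            = (none, none, acc ++ [(s, p - 1)]) := by
          unfold pvStepA; rw [hS]; simp
        simp only [List.foldl_cons, hstep]
        have := ih (p + 1) none (acc ++ [(s, p - 1)])
        simp only [Option.map_none] at this
        rw [this]
        simp [pvSimA, hS]
      | none =>
        have hstep : pvStepA disk (none, (none : Option Int).map (fun _ => p - 1), acc) p
            = (none, none, acc) := by
          unfold pvStepA; rw [hS]; simp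
        simp only [List.foldl_cons, hstep]
        have := ih (p + 1) none acc
        simp only [Option.map_none] at this
        rw [this]
        simp [pvSimA, hS]
    · have hS' : (disk.any (fun kv => kv.1 == p)) = false := Bool.eq_false_iff.mpr hS
      have hstep : pvStepA disk (bs, bs.map (fun _ => p - 1), acc) p
          = (some (bs.getD p), some p, acc) := by
        cases bs <;> (unfold pvStepA; rw [hS']; simp)
      simp only [List.foldl_cons, hstep]
      have := ih (p + 1) (some (bs.getD p)) acc
      simp only [Option.map_some] at this
      have hp1 : p + 1 - 1 = p := by ring
      rw [hp1] at this
      rw [this]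
      simp [pvSimA, hS']

theorem pvFoldB (L : List Int) :
    ∀ (prev : Int) (acc : List (Int × Int)),
    (L.foldl pvStepB (prev, acc)).2 = acc ++ pvSimB prev L := by
  induction L with
  | nil => intro prev acc; simp [pvSimB]
  | cons p rest ih =>
    intro prev acc
    simp only [List.foldl_cons, pvStepB]
    rw [ih]
    by_cases h : prev + 1 < p <;> simp [pvSimB, h]

theorem pvMain (disk : List (Int × Int)) (n : Nat) :
    ∀ (p : Int) (bs : Option Int), (∀ s, bs = some s → s ≤ p - 1) →
    pvSimA disk n p bs
      = pvSimB ((bs.getD p) - 1)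
          ((PySem.List.pyRange p (p + n) 1).filter (fun q => disk.any (fun kv => kv.1 == q))) := by
  induction n with
  | zero =>
    intro p bs _
    rw [PySem.List.pyRange_one_eq_nil (by simp)]
    simp [pvSimA, pvSimB]
  | succ n ih =>
    intro p bs hbs
    rw [PySem.List.pyRange_one_cons (by omega : p < p + (↑(n+1) : Int))]
    have hb : p + (↑(n+1) : Int) = (p + 1) + (n : Int) := by push_cast; ring
    rw [hb]
    by_cases hS : disk.any (fun kv => kv.1 == p) = true
    · rw [List.filter_cons_of_pos (by exact hS)]
      cases bs with
      | some s =>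
        have hs : s ≤ p - 1 := hbs s rfl
        have hA : pvSimA disk (n+1) p (some s) = (s, p - 1) :: pvSimA disk n (p + 1) none := by
          simp only [pvSimA]; rw [hS]; simp
        have hrec := ih (p + 1) none (by intro s h; cases h)
        simp only [Option.getD_none] at hrec
        have h1 : p + 1 - 1 = p := by ring
        rw [h1] at hrec
        rw [hA, hrec]
        simp only [Option.getD_some, pvSimB]
        rw [if_pos (show s - 1 + 1 < p by omega)]
        have h2 : s - 1 + 1 = s := by ring
        rw [h2]
        rfl
      | none =>
        have hA : pvSimA disk (n+1) p none = pvSimA disk n (p + 1) none := by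
          simp only [pvSimA]; rw [hS]; simp
        have hrec := ih (p + 1) none (by intro s h; cases h)
        simp only [Option.getD_none] at hrec
        have h1 : p + 1 - 1 = p := by ring
        rw [h1] at hrec
        rw [hA, hrec]
        simp only [Option.getD_none, pvSimB]
        rw [if_neg (show ¬ (p - 1 + 1 < p) by omega)]
        rfl
    · have hS' : (disk.any (fun kv => kv.1 == p)) = false := Bool.eq_false_iff.mpr hS
      rw [List.filter_cons_of_neg
        (by show ¬ ((disk.any fun kv => kv.1 == p) = true); rw [hS']; simp)]
      have hle : bs.getD p ≤ p := by
        cases bs with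
        | none => simp
        | some s => have := hbs s rfl; simp only [Option.getD_some]; omega
      have hrec := ih (p + 1) (some (bs.getD p))
        (by intro s h; injection h with h; omega)
      simp only [Option.getD_some] at hrec
      have hA : pvSimA disk (n+1) p bs = pvSimA disk n (p + 1) (some (bs.getD p)) := by
        simp only [pvSimA]; rw [hS']; simp
      rw [hA, hrec]

-- the range A scans, rewritten with a Nat length so the inductions above apply
theorem pvRangeBridge (start stop : Int) :
    PySem.List.pyRange start (stop + 1) 1
      = PySem.List.pyRange start (start + ((stop + 1 - start).toNat : Int)) 1 := by
  by_cases h : start ≤ stop + 1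
  · congr 1; omega
  · rw [PySem.List.pyRange_one_eq_nil (by omega), PySem.List.pyRange_one_eq_nil (by omega)]

-- B's sorted, filtered key list IS the increasing list of occupied positions in the range
theorem pvSortedEq (disk : List (Int × Int)) (start stop : Int) :
    PySem.List.sorted ((PySem.List.dedup (disk.map Prod.fst)).filter
        (fun k => decide (start ≤ k) && decide (k ≤ stop))) (fun x => x) false
      = (PySem.List.pyRange start (stop + 1) 1).filter (fun q => disk.any (fun kv => kv.1 == q)) := by
  apply PySem.List.sorted_eq_of_perm_of_pairwise_lt
  · rw [List.perm_ext_iff_of_nodup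
      ((PySem.List.nodup_pyRange_one start (stop + 1)).filter _)
      ((PySem.List.nodup_dedup _).filter _)]
    intro x
    simp only [List.mem_filter, PySem.List.mem_pyRange_one, PySem.List.mem_dedup,
      List.any_eq_true, List.mem_map, Bool.and_eq_true, decide_eq_true_eq, beq_iff_eq]
    constructor
    · rintro ⟨⟨h1, h2⟩, kv, hkv, hk⟩
      exact ⟨⟨kv, hkv, hk⟩, h1, by omega⟩
    · rintro ⟨⟨kv, hkv, hk⟩, h1, h2⟩
      exact ⟨⟨h1, by omega⟩, kv, hkv, hk⟩
  · exact (PySem.List.pairwise_lt_pyRange_one start (stop + 1)).filter _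

-- ===== VERDICT (by name: the statement is the Claim_ definition above) =====
theorem get_free_space_blocks_spec : Claim_equal_get_free_space_blocks := by
  intro disk start stop _
  unfold Spec_get_free_space_blocks get_free_space_blocks get_free_space_blocks_alt
  rw [pvSortedEq, pvRangeBridge]
  have hA := pvFoldA disk (stop + 1 - start).toNat start none []
  simp only [Option.map_none] at hA
  rw [hA]
  have hB := pvFoldB ((PySem.List.pyRange start (start + ((stop + 1 - start).toNat : Int)) 1).filter
      (fun q => disk.any (fun kv => kv.1 == q))) (start - 1) []
  rw [hB]
  have hM := pvMain disk (stop + 1 - start).toNat start none (by intro s h; cases h)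
  simp only [Option.getD] at hM
  rw [hM]
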